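-- pv_equiv track=rewrite | github.com/prefixFelix/FernoPy | src/tx/fernotron.py | convert_to_bits
-- ===== SOURCE A (Python) =====
-- def rev(s):
--     r = ""
--     for c in s:
--         r = c + r
--     return r
--
-- def convert_to_bits(msg_hex):
--     msg = str(hex(msg_hex))[2:]
--
--     msg_bit = ''
--     for i in range(0, len(msg), 2):
--         field = msg[i:i + 2]
--         field_dec = int(field, 16)
--         field_bit = str(bin(field_dec))[2:]
--
--         field_len = len(field_bit)
--         if field_len != 8:
--             zero_num = 8 - field_len
--             field_bit = '0'*zero_num + field_bit
--
--         count_ones = field_bit.count('1')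
--         if count_ones % 2 == 0:
--             parity = ('00', '11')
--         else:
--             parity = ('01', '10')
--         field_reversed = rev(field_bit)
--
--         for j in range(2):
--             # Add gap
--             msg_bit += 'G'
--
--             suffix = parity[0]
--             if j % 2 != 0:
--                 suffix = parity[1]
--             msg_bit += field_reversed + suffix
--
--     return msg_bit + 'G'
-- ===== SOURCE B (Python) =====
-- def convert_to_bits(msg_hex):
--     msg = str(hex(msg_hex))[2:]
--     out = ['G']
--     for i in range(0, len(msg), 2):
--         d = int(msg[i:i + 2], 16)
--         # LSB-first bit string by integer shifts (no bin()/pad/reverse pipeline)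
--         bits = ''.join(str((d >> k) & 1) for k in range(8))
--         # parity of the byte by xor-folding
--         p = d
--         p ^= p >> 4
--         p ^= p >> 2
--         p ^= p >> 1
--         even = (p & 1) == 0
--         out.append(bits + ('00' if even else '01') + 'G')
--         out.append(bits + ('11' if even else '10') + 'G')
--     return ''.join(out)
-- ===== Notes on version B (the rewrite author's own statement) =====
-- stated objective: alternative
-- what changed: Per byte, B derives the LSB-first bit string by integer shift/mask extraction and the parity by xor-folding the byte, replacing A's bin()-string + zero-pad + character-by-character reverse + '1'-count pipeline; output is assembled as a list of segments joined once instead of repeated string concatenation.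
import Mathlib
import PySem

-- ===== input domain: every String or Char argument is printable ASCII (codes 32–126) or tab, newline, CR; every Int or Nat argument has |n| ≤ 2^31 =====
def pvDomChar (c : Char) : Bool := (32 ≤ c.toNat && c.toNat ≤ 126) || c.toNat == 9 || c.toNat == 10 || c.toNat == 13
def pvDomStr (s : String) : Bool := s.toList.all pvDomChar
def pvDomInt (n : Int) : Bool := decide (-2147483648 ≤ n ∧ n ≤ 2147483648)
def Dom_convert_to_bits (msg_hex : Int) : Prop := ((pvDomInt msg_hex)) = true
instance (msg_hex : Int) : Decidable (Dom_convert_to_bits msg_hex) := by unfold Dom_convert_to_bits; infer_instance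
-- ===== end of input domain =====

-- B replaces A's bin()+zero-pad+manual-reverse+count pipeline per byte with integer
-- bit extraction (shifts/masks) and xor-fold parity; objective: alternative/simpler.

-- ===== PORT A =====
-- str(hex(n))[2:] — hand-ported (PySem has no hex()); exact: "0x" + lowercase hex
-- digits for n ≥ 0, "-0x…" for n < 0, then drop the first two characters.
def pyHexDigitChar (m : Nat) : Char :=
  if m < 10 then Char.ofNat (48 + m) else Char.ofNat (87 + m)

def pyHexDigitsAux : Nat → List Char
  | n => if h : n < 16 then [pyHexDigitChar n]
         else pyHexDigitsAux (n / 16) ++ [pyHexDigitChar (n % 16)]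
  decreasing_by exact Nat.div_lt_self (by omega) (by omega)

def pyHexTail (n : Int) : List Char :=
  if n < 0 then 'x' :: pyHexDigitsAux (-n).toNat else pyHexDigitsAux n.toNat

-- r = '';  for c in s: r = c + r
def rev (s : List Char) : List Char := s.foldl (fun r c => c :: r) []

def convert_to_bits (msg_hex : Int) : String :=
  let msg := pyHexTail msg_hex
  let msg_bit : List Char :=
    (PySem.List.pyRange 0 (PySem.List.len msg) 2).foldl (fun msg_bit i =>
      let field := PySem.List.slice msg (some i) (some (i + 2))
      -- int(field, 16); none = ValueError, excluded by Pre_ (msg_hex < 0)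
      let field_dec := (PySem.Int.ofCharsBase? field 16).getD 0
      let field_bit := PySem.List.slice (PySem.Int.toBinChars0b field_dec) (some 2) none
      let field_len := field_bit.length
      let field_bit := if field_len ≠ 8
                       then List.replicate (8 - field_len) '0' ++ field_bit
                       else field_bit
      -- field_bit.count('1'): a 1-char needle, so str.count = list count
      let count_ones := PySem.List.count field_bit '1'
      let parity := if count_ones % 2 == 0 then (['0','0'], ['1','1'])
                    else (['0','1'], ['1','0'])
      let field_reversed := rev field_bit
      (PySem.List.pyRange 0 2 1).foldl (fun msg_bit j =>
        let msg_bit := msg_bit ++ ['G']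
        let suffix := if PySem.Int.mod j 2 ≠ 0 then parity.2 else parity.1
        msg_bit ++ field_reversed ++ suffix) msg_bit) []
  String.mk (msg_bit ++ ['G'])

-- ===== PORT B =====
def convert_to_bits_alt (msg_hex : Int) : String :=
  let msg := pyHexTail msg_hex
  let out : List (List Char) :=
    (PySem.List.pyRange 0 (PySem.List.len msg) 2).foldl (fun out i =>
      let d := (PySem.Int.ofCharsBase? (PySem.List.slice msg (some i) (some (i + 2))) 16).getD 0
      let bits := ((PySem.List.pyRange 0 8 1).map
        (fun k => PySem.Int.toChars (PySem.Int.band (d >>> k.toNat) 1))).flatten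
      let p := d
      let p := PySem.Int.bxor p (p >>> 4)
      let p := PySem.Int.bxor p (p >>> 2)
      let p := PySem.Int.bxor p (p >>> 1)
      let even := PySem.Int.band p 1 == 0
      out ++ [bits ++ (if even then ['0','0'] else ['0','1']) ++ ['G'],
              bits ++ (if even then ['1','1'] else ['1','0']) ++ ['G']]) [['G']]
  String.mk out.flatten

-- ===== PRECONDITION & SPEC =====
-- Pre_ excludes negative msg_hex: there str(hex(…))[2:] starts with an 'x' and
-- int(…, 16) raises ValueError in both A and B; it excludes nothing else.
def Pre_convert_to_bits (msg_hex : Int) : Prop := 0 ≤ msg_hex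
instance (msg_hex : Int) : Decidable (Pre_convert_to_bits msg_hex) := by
  unfold Pre_convert_to_bits; infer_instance

def pvWitness_convert_to_bits : Int := (4919)

def Spec_convert_to_bits (msg_hex : Int) (out : String) : Prop := out = convert_to_bits_alt msg_hex
instance (msg_hex : Int) (out : String) : Decidable (Spec_convert_to_bits msg_hex out) := by unfold Spec_convert_to_bits; infer_instance

-- ===== CLAIM (what is proved, stated in full; the proofs are below) =====
def Claim_equal_convert_to_bits : Prop := ∀ (msg_hex : Int), Dom_convert_to_bits msg_hex → Pre_convert_to_bits msg_hex → Spec_convert_to_bits msg_hex (convert_to_bits msg_hex)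

-- ===== LEMMAS AND PROOFS =====

-- A's per-field emission (what the two unfolded iterations of the j-loop append),
-- and B's, as functions of the decoded byte value d.
def aField (d : Int) : List Char :=
  let field_bit := PySem.List.slice (PySem.Int.toBinChars0b d) (some 2) none
  let field_len := field_bit.length
  let field_bit := if field_len ≠ 8
                   then List.replicate (8 - field_len) '0' ++ field_bit
                   else field_bit
  let count_ones := PySem.List.count field_bit '1'
  let parity := if count_ones % 2 == 0 then (['0','0'], ['1','1'])
                else (['0','1'], ['1','0'])
  let field_reversed := rev field_bit
  (field_reversed ++ parity.1 ++ ['G']) ++ (field_reversed ++ parity.2 ++ ['G'])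

def bField (d : Int) : List Char :=
  let bits := ((PySem.List.pyRange 0 8 1).map
    (fun k => PySem.Int.toChars (PySem.Int.band (d >>> k.toNat) 1))).flatten
  let p := d
  let p := PySem.Int.bxor p (p >>> 4)
  let p := PySem.Int.bxor p (p >>> 2)
  let p := PySem.Int.bxor p (p >>> 1)
  let even := PySem.Int.band p 1 == 0
  (bits ++ (if even then ['0','0'] else ['0','1']) ++ ['G']) ++
  (bits ++ (if even then ['1','1'] else ['1','0']) ++ ['G'])

set_option maxRecDepth 40000 in
lemma field_eq_of_lt_256 : ∀ m : Fin 256, aField ((m : Nat) : Int) = bField ((m : Nat) : Int) := by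
  decide

lemma field_eq (d : Int) (h0 : 0 ≤ d) (h1 : d < 256) : aField d = bField d := by
  have : d = ((d.toNat : Nat) : Int) := by omega
  rw [this]
  exact field_eq_of_lt_256 ⟨d.toNat, by omega⟩


def hexCharList : List Char := ['0','1','2','3','4','5','6','7','8','9','a','b','c','d','e','f']

-- the loop bodies of the two ports, named so the folds can be reasoned about
def stepA (msg msg_bit : List Char) (i : Int) : List Char :=
  let field := PySem.List.slice msg (some i) (some (i + 2))
  let field_dec := (PySem.Int.ofCharsBase? field 16).getD 0
  let field_bit := PySem.List.slice (PySem.Int.toBinChars0b field_dec) (some 2) none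
  let field_len := field_bit.length
  let field_bit := if field_len ≠ 8
                   then List.replicate (8 - field_len) '0' ++ field_bit
                   else field_bit
  let count_ones := PySem.List.count field_bit '1'
  let parity := if count_ones % 2 == 0 then (['0','0'], ['1','1'])
                else (['0','1'], ['1','0'])
  let field_reversed := rev field_bit
  (PySem.List.pyRange 0 2 1).foldl (fun msg_bit j =>
    let msg_bit := msg_bit ++ ['G']
    let suffix := if PySem.Int.mod j 2 ≠ 0 then parity.2 else parity.1
    msg_bit ++ field_reversed ++ suffix) msg_bit

def stepB (msg : List Char) (out : List (List Char)) (i : Int) : List (List Char) :=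
  let d := (PySem.Int.ofCharsBase? (PySem.List.slice msg (some i) (some (i + 2))) 16).getD 0
  let bits := ((PySem.List.pyRange 0 8 1).map
    (fun k => PySem.Int.toChars (PySem.Int.band (d >>> k.toNat) 1))).flatten
  let p := d
  let p := PySem.Int.bxor p (p >>> 4)
  let p := PySem.Int.bxor p (p >>> 2)
  let p := PySem.Int.bxor p (p >>> 1)
  let even := PySem.Int.band p 1 == 0
  out ++ [bits ++ (if even then ['0','0'] else ['0','1']) ++ ['G'],
          bits ++ (if even then ['1','1'] else ['1','0']) ++ ['G']]

def dOf (msg : List Char) (i : Int) : Int :=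
  (PySem.Int.ofCharsBase? (PySem.List.slice msg (some i) (some (i + 2))) 16).getD 0

lemma convert_A_eq (n : Int) : convert_to_bits n =
    String.mk (((PySem.List.pyRange 0 (PySem.List.len (pyHexTail n)) 2).foldl
      (stepA (pyHexTail n)) []) ++ ['G']) := rfl

lemma convert_B_eq (n : Int) : convert_to_bits_alt n =
    String.mk (((PySem.List.pyRange 0 (PySem.List.len (pyHexTail n)) 2).foldl
      (stepB (pyHexTail n)) [['G']]).flatten) := rfl

lemma pyRange_01 : PySem.List.pyRange 0 2 1 = [0, 1] := by decide

lemma stepA_eq (msg acc : List Char) (i : Int) :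
    stepA msg acc i ++ ['G'] = (acc ++ ['G']) ++ aField (dOf msg i) := by
  simp only [stepA, aField, dOf, pyRange_01, List.foldl]
  norm_num [PySem.Int.mod]
  simp

lemma stepB_eq (msg : List Char) (out : List (List Char)) (i : Int) :
    (stepB msg out i).flatten = out.flatten ++ bField (dOf msg i) := by
  simp [stepB, bField, dOf]

lemma byte_range (cs : List Char) (hlen : cs.length ≤ 2) (h : ∀ c ∈ cs, c ∈ hexCharList) :
    0 ≤ (PySem.Int.ofCharsBase? cs 16).getD 0 ∧ (PySem.Int.ofCharsBase? cs 16).getD 0 < 256 := by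
  match cs with
  | [] => decide
  | [c] =>
    have hc := h c (by simp)
    fin_cases hc <;> decide
  | [c, c'] =>
    have hc := h c (by simp)
    have hc' := h c' (by simp)
    fin_cases hc <;> fin_cases hc' <;> decide
  | _ :: _ :: _ :: _ => simp at hlen

lemma dOf_range (msg : List Char) (h : ∀ c ∈ msg, c ∈ hexCharList) (i : Int) (hi : 0 ≤ i) :
    0 ≤ dOf msg i ∧ dOf msg i < 256 := by
  have hs : PySem.List.slice msg (some i) (some (i + 2)) =
      (msg.drop i.toNat).take ((i + 2).toNat - i.toNat) :=
    PySem.List.slice_toNat msg hi (by omega)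
  have h2 : (i + 2).toNat - i.toNat = 2 := by omega
  unfold dOf
  rw [hs, h2]
  refine byte_range _ (List.length_take_le _ _ |>.trans (le_refl 2)) ?_
  intro c hc
  exact h c (List.mem_of_mem_drop (List.mem_of_mem_take hc))

lemma loop (msg : List Char) (h : ∀ c ∈ msg, c ∈ hexCharList) :
    ∀ (idxs : List Int), (∀ i ∈ idxs, 0 ≤ i) →
    ∀ (acc : List Char) (out : List (List Char)), acc ++ ['G'] = out.flatten →
    (idxs.foldl (stepA msg) acc) ++ ['G'] = (idxs.foldl (stepB msg) out).flatten := by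
  intro idxs
  induction idxs with
  | nil => intro _ acc out hinv; simpa using hinv
  | cons i rest ih =>
    intro hpos acc out hinv
    simp only [List.foldl_cons]
    refine ih (fun j hj => hpos j (by simp [hj])) _ _ ?_
    obtain ⟨h0, h1⟩ := dOf_range msg h i (hpos i (by simp))
    rw [stepA_eq, stepB_eq, hinv, field_eq _ h0 h1]

lemma hexDigitChar_mem (m : Nat) (hm : m < 16) : pyHexDigitChar m ∈ hexCharList := by
  interval_cases m <;> decide

lemma hexDigitsAux_mem (n : Nat) : ∀ c ∈ pyHexDigitsAux n, c ∈ hexCharList := by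
  induction n using Nat.strong_induction_on with
  | _ n ih =>
    intro c hc
    rw [pyHexDigitsAux] at hc
    by_cases h16 : n < 16
    · simp [h16] at hc
      subst hc; exact hexDigitChar_mem n h16
    · simp [h16] at hc
      rcases hc with hc | hc
      · exact ih (n / 16) (Nat.div_lt_self (by omega) (by omega)) c hc
      · subst hc; exact hexDigitChar_mem (n % 16) (Nat.mod_lt _ (by omega))

-- ===== VERDICT (by name: the statement is the Claim_ definition above) =====
theorem convert_to_bits_spec : Claim_equal_convert_to_bits := by
  intro n _ hpre
  replace hpre : (0 : Int) ≤ n := hpre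
  unfold Spec_convert_to_bits
  rw [convert_A_eq, convert_B_eq]
  have hmsg : pyHexTail n = pyHexDigitsAux n.toNat := by
    unfold pyHexTail
    rw [if_neg (by omega)]
  congr 1
  refine loop (pyHexTail n) ?_ _ ?_ [] [['G']] rfl
  · rw [hmsg]; exact hexDigitsAux_mem n.toNat
  · intro i hi
    exact ((PySem.List.mem_pyRange_iff_of_pos (by norm_num) i).mp hi).1
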